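-- pv_equiv track=rewrite | github.com/Suchitra1912/coding-challenges | coding_challenge_42/solution.py | generate_series
-- ===== SOURCE A (Python) =====
-- def generate_series(n: int) -> list[int]:
--     series = []
--     current = 1
--     sign = 1
--     for i in range(n):
--         series.append(current)
--         current += 4 * sign
--         sign *= -1
--     return series
-- ===== SOURCE B (Python) =====
-- def generate_series(n: int) -> list[int]:
--     return [1 + 4 * (i % 2) for i in range(n)]
-- ===== Notes on version B (the rewrite author's own statement) =====
-- stated objective: simpler
-- what changed: Replaces the stateful loop carrying a running value and a flipping sign with a per-index closed form 1 + 4*(i % 2) mapped over range(n).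
import Mathlib
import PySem

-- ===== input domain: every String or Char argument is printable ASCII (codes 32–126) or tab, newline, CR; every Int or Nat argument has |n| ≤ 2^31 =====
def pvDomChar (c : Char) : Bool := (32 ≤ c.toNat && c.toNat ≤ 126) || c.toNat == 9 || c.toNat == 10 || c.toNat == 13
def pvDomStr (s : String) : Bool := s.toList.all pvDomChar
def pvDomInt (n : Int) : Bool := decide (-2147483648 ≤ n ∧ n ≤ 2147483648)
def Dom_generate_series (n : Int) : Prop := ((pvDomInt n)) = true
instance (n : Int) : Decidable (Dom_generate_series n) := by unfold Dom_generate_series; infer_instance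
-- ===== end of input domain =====

-- B replaces A's stateful accumulator/sign loop with a per-index closed form 1 + 4*(i % 2) (objective: simpler).

-- ===== PORT A =====
def generate_series (n : Int) : List Int :=
  -- series = []; current = 1; sign = 1; for i in range(n): append current; current += 4*sign; sign *= -1
  let st := (PySem.List.pyRange 0 n 1).foldl
    (fun st _i => (st.1 ++ [st.2.1], st.2.1 + 4 * st.2.2, st.2.2 * (-1)))
    (([] : List Int), (1 : Int), (1 : Int))
  st.1

-- ===== PORT B =====
def generate_series_alt (n : Int) : List Int :=
  (PySem.List.pyRange 0 n 1).map (fun i => 1 + 4 * PySem.Int.mod i 2)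

-- ===== PRECONDITION & SPEC =====
def Spec_generate_series (n : Int) (out : List Int) : Prop := out = generate_series_alt n
instance (n : Int) (out : List Int) : Decidable (Spec_generate_series n out) := by unfold Spec_generate_series; infer_instance

-- ===== CLAIM (what is proved, stated in full; the proofs are below) =====
def Claim_equal_generate_series : Prop := ∀ (n : Int), Dom_generate_series n → Spec_generate_series n (generate_series n)

-- ===== LEMMAS AND PROOFS =====

-- A's loop body ignores the loop index, so its result only depends on the list's length:
-- starting from (s, c, g), the appended elements follow the closed form c + 4*g*(k % 2).
theorem generate_series_loop (l : List Int) (s : List Int) (c g : Int) :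
    (l.foldl (fun st _i => (st.1 ++ [st.2.1], st.2.1 + 4 * st.2.2, st.2.2 * (-1))) (s, c, g)).1
      = s ++ (List.range l.length).map (fun k => c + 4 * g * ((k % 2 : Nat) : Int)) := by
  induction l generalizing s c g with
  | nil => simp
  | cons x l ih =>
      simp only [List.foldl_cons, List.length_cons, List.range_succ_eq_map]
      rw [ih]
      simp only [List.map_cons, List.map_map, List.append_assoc, List.singleton_append]
      congr 2
      · simp
      · apply List.map_congr_left
        intro k _
        simp only [Function.comp]
        rcases Nat.even_or_odd k with hk | hk
        · have h0 : k % 2 = 0 := Nat.even_iff.mp hk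
          have h1 : (k + 1) % 2 = 1 := by omega
          simp [h0, h1]
        · have h0 : k % 2 = 1 := Nat.odd_iff.mp hk
          have h1 : (k + 1) % 2 = 0 := by omega
          simp [h0, h1]

-- ===== VERDICT (by name: the statement is the Claim_ definition above) =====
theorem generate_series_spec : Claim_equal_generate_series := by
  intro n _
  unfold Spec_generate_series generate_series generate_series_alt
  rw [PySem.List.pyRange_one 0 n]
  simp only [generate_series_loop, List.length_map, List.length_range, List.map_map,
    List.nil_append]
  apply List.map_congr_left
  intro k _
  simp only [Function.comp, zero_add]
  rw [show PySem.Int.mod (k : Int) 2 = ((k % 2 : Nat) : Int) from PySem.Int.mod_natCast k 2]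
  ring
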